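-- pv_equiv track=rewrite | github.com/sebasibarguen/semantic-shift-freedom | src/normalizer.py | normalize_u_v
-- ===== SOURCE A (Python) =====
-- def normalize_u_v(text: str) -> str:
--     """
--     Normalize u/v interchange.
--     In Early Modern English:
--     - Initial 'v' often = 'u' (vnto → unto)
--     - Medial 'u' often = 'v' (haue → have)
--
--     This is a heuristic - not perfect but catches common cases.
--     """
--     words = text.split()
--     normalized = []
--
--     for word in words:
--         if not word:
--             normalized.append(word)
--             continue
--
--         # Handle initial v → u (before consonant)
--         if len(word) > 1 and word[0].lower() == 'v':
--             next_char = word[1].lower()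
--             # If v is followed by a consonant (not a, e, i, o, u)
--             if next_char not in 'aeiou':
--                 if word[0] == 'V':
--                     word = 'U' + word[1:]
--                 else:
--                     word = 'u' + word[1:]
--
--         normalized.append(word)
--
--     return ' '.join(normalized)
-- ===== SOURCE B (Python) =====
-- def normalize_u_v(text: str) -> str:
--     """One-pass scan: no split/join, tracks word starts and collapses whitespace directly."""
--     out = []
--     started = False   # some word already emitted
--     in_word = False   # currently inside a word
--     for i, c in enumerate(text):
--         if c.isspace():
--             in_word = False
--             continue
--         if in_word:
--             out.append(c)
--             continue
--         # word start
--         if started: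
--             out.append(' ')
--         nxt = text[i + 1] if i + 1 < len(text) else None
--         if c in 'vV' and nxt is not None and not nxt.isspace() and nxt.lower() not in 'aeiou':
--             out.append('U' if c == 'V' else 'u')
--         else:
--             out.append(c)
--         started = True
--         in_word = True
--     return ''.join(out)
-- ===== Notes on version B (the rewrite author's own statement) =====
-- stated objective: alternative
-- what changed: Replaces split()/per-word loop/join() with a single left-to-right character scan that tracks word-start and whitespace state, collapsing whitespace and rewriting initial v/V in one pass without building a word list.
import Mathlib
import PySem

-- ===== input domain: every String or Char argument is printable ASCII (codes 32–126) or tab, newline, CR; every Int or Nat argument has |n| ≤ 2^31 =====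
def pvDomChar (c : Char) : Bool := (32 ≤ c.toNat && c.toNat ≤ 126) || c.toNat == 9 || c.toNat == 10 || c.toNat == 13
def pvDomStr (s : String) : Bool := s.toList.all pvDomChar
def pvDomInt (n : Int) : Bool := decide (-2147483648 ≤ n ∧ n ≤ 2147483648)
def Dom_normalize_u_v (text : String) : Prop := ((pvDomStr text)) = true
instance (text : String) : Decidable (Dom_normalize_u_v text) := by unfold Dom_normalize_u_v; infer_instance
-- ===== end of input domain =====

-- B replaces A's split()/per-word loop/join() by a single character scan with word-start/whitespace state; same O(n) cost, different decomposition.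

-- ===== PORT A =====
-- per-word body of A's loop: initial v/V in a word of length > 1, before a non-vowel, becomes u/U
def pvAWord (w : List Char) : List Char :=
  match w with
  | c :: d :: rest =>
    if PySem.Chars.lowerChar c = 'v' then
      if PySem.Chars.isIn [PySem.Chars.lowerChar d] ['a','e','i','o','u'] then c :: d :: rest
      else if c = 'V' then 'U' :: d :: rest else 'u' :: d :: rest
    else c :: d :: rest
  | w => w

def normalize_u_v (text : String) : String :=
  String.ofList
    (PySem.Chars.join [' ']
      ((PySem.Chars.split₀ text.toList).foldl (fun acc w => acc ++ [pvAWord w]) []))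

-- ===== PORT B =====
-- char emitted at a word start (c is the word's first char, rest is the remaining text)
def pvBHead (c : Char) (rest : List Char) : Char :=
  match rest with
  | d :: _ =>
    if (c = 'v' ∨ c = 'V') ∧ PySem.Chars.isspace d = false ∧
        PySem.Chars.lowerChar d ∉ (['a','e','i','o','u'] : List Char) then
      (if c = 'V' then 'U' else 'u')
    else c
  | [] => c

-- the scan: started = some word already emitted, inWord = currently inside a word
def pvBGo : List Char → Bool → Bool → List Char
  | [], _, _ => []
  | c :: rest, started, inWord =>
    if PySem.Chars.isspace c then pvBGo rest started false
    else if inWord then c :: pvBGo rest started true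
    else (if started then [' '] else []) ++ pvBHead c rest :: pvBGo rest true true

def normalize_u_v_alt (text : String) : String :=
  String.ofList (pvBGo text.toList false false)

-- ===== PRECONDITION & SPEC =====
def Spec_normalize_u_v (text : String) (out : String) : Prop := out = normalize_u_v_alt text
instance (text : String) (out : String) : Decidable (Spec_normalize_u_v text out) := by unfold Spec_normalize_u_v; infer_instance

-- ===== CLAIM (what is proved, stated in full; the proofs are below) =====
def Claim_equal_normalize_u_v : Prop := ∀ (text : String), Dom_normalize_u_v text → Spec_normalize_u_v text (normalize_u_v text)

-- ===== LEMMAS AND PROOFS =====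

theorem pvFoldl_append_map (f : List Char → List Char) :
    ∀ (l : List (List Char)) (acc : List (List Char)),
      l.foldl (fun a w => a ++ [f w]) acc = acc ++ l.map f := by
  intro l
  induction l with
  | nil => intro acc; simp
  | cons w l ih => intro acc; simp [List.foldl_cons, ih]

theorem pvGo_acc : ∀ (s cur : List Char) (acc : List (List Char)),
    PySem.Chars.split₀.go s cur acc = acc.reverse ++ PySem.Chars.split₀.go s cur [] := by
  intro s
  induction s with
  | nil =>
    intro cur acc
    simp only [PySem.Chars.split₀.go]
    by_cases h : cur.isEmpty <;> simp [h]
  | cons c rest ih =>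
    intro cur acc
    by_cases hs : PySem.Chars.isspace c
    · by_cases hc : cur.isEmpty
      · rw [show PySem.Chars.split₀.go (c::rest) cur acc = PySem.Chars.split₀.go rest [] acc from by
            simp [PySem.Chars.split₀.go, hs, hc],
          show PySem.Chars.split₀.go (c::rest) cur [] = PySem.Chars.split₀.go rest [] [] from by
            simp [PySem.Chars.split₀.go, hs, hc]]
        exact ih [] acc
      · rw [show PySem.Chars.split₀.go (c::rest) cur acc = PySem.Chars.split₀.go rest [] (cur.reverse :: acc) from by
            simp [PySem.Chars.split₀.go, hs, hc],
          show PySem.Chars.split₀.go (c::rest) cur [] = PySem.Chars.split₀.go rest [] [cur.reverse] from by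
            simp [PySem.Chars.split₀.go, hs, hc]]
        rw [ih [] (cur.reverse :: acc), ih [] [cur.reverse]]
        simp
    · rw [show PySem.Chars.split₀.go (c::rest) cur acc = PySem.Chars.split₀.go rest (c::cur) acc from by
          simp [PySem.Chars.split₀.go, hs],
        show PySem.Chars.split₀.go (c::rest) cur [] = PySem.Chars.split₀.go rest (c::cur) [] from by
          simp [PySem.Chars.split₀.go, hs]]
      exact ih (c :: cur) acc

theorem pvSplit_cons_space (c : Char) (cs : List Char) (h : PySem.Chars.isspace c = true) :
    PySem.Chars.split₀ (c :: cs) = PySem.Chars.split₀ cs := by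
  simp [PySem.Chars.split₀, PySem.Chars.split₀.go, h]

theorem pvGo_word : ∀ (s cur : List Char), cur ≠ [] →
    PySem.Chars.split₀.go s cur [] =
      (cur.reverse ++ s.takeWhile (fun d => !PySem.Chars.isspace d)) ::
        PySem.Chars.split₀ (s.dropWhile (fun d => !PySem.Chars.isspace d)) := by
  intro s
  induction s with
  | nil =>
    intro cur hcur
    simp [PySem.Chars.split₀.go, PySem.Chars.split₀, List.isEmpty_iff, hcur]
  | cons c rest ih =>
    intro cur hcur
    by_cases hs : PySem.Chars.isspace c
    · rw [show PySem.Chars.split₀.go (c::rest) cur [] = PySem.Chars.split₀.go rest [] [cur.reverse] from by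
          simp [PySem.Chars.split₀.go, hs, List.isEmpty_iff, hcur],
        pvGo_acc rest [] [cur.reverse]]
      simp [hs, PySem.Chars.split₀, PySem.Chars.split₀.go]
    · have hs' : PySem.Chars.isspace c = false := by simpa using hs
      rw [show PySem.Chars.split₀.go (c::rest) cur [] = PySem.Chars.split₀.go rest (c::cur) [] from by
          simp [PySem.Chars.split₀.go, hs']]
      rw [ih (c :: cur) (by simp)]
      simp [hs']

theorem pvSplit_cons_word (c : Char) (cs : List Char) (h : PySem.Chars.isspace c = false) :
    PySem.Chars.split₀ (c :: cs) =
      (c :: cs.takeWhile (fun d => !PySem.Chars.isspace d)) ::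
        PySem.Chars.split₀ (cs.dropWhile (fun d => !PySem.Chars.isspace d)) := by
  rw [show PySem.Chars.split₀ (c::cs) = PySem.Chars.split₀.go cs [c] [] from by
      simp [PySem.Chars.split₀, PySem.Chars.split₀.go, h]]
  rw [pvGo_word cs [c] (by simp)]
  simp

theorem pvJoin_cons (w : List Char) (ws : List (List Char)) :
    PySem.Chars.join [' '] (w :: ws) =
      w ++ (if ws = [] then [] else ' ' :: PySem.Chars.join [' '] ws) := by
  cases ws with
  | nil => simp [PySem.Chars.join, List.intercalate]
  | cons w' ws' => simp [PySem.Chars.join, List.intercalate, List.intersperse]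

theorem pvIsIn_singleton (x : Char) (l : List Char) :
    PySem.Chars.isIn [x] l = true ↔ x ∈ l := by
  rw [PySem.Chars.isIn_iff_infix]
  constructor
  · intro h; exact h.mem (List.mem_singleton_self x)
  · intro h
    obtain ⟨s, t, rfl⟩ := List.append_of_mem h
    exact ⟨s, t, by simp⟩

theorem pvCharToNat_ofNat (n : Nat) (h : n < 55296) : (Char.ofNat n).toNat = n := by
  rw [Char.ofNat, dif_pos (Or.inl h)]
  rw [Char.toNat, Char.ofNatAux]
  simp

theorem pvLower_eq_v (c : Char) : PySem.Chars.lowerChar c = 'v' ↔ (c = 'v' ∨ c = 'V') := by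
  constructor
  · intro h
    unfold PySem.Chars.lowerChar at h
    split_ifs at h with hu
    · right
      unfold PySem.Chars.isupper at hu
      simp only [Bool.and_eq_true, decide_eq_true_eq] at hu
      obtain ⟨hu1, hu2⟩ := hu
      rw [Char.le_def, UInt32.le_iff_toNat_le] at hu1 hu2
      have hb : 65 ≤ c.toNat ∧ c.toNat ≤ 90 := ⟨hu1, hu2⟩
      have h2 : (Char.ofNat (c.toNat + 32)).toNat = c.toNat + 32 :=
        pvCharToNat_ofNat _ (by omega)
      have h3 := congrArg Char.toNat h
      rw [h2] at h3
      have hv : Char.toNat 'v' = 118 := by decide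
      have hV : Char.toNat 'V' = 86 := by decide
      have h4 : c.toNat = Char.toNat 'V' := by omega
      exact Char.ext (UInt32.toNat_inj.mp h4)
    · exact Or.inl h
  · rintro (rfl | rfl) <;> decide

theorem pvAWord_head (c : Char) (rest : List Char) :
    pvAWord (c :: rest.takeWhile (fun d => !PySem.Chars.isspace d)) =
      pvBHead c rest :: rest.takeWhile (fun d => !PySem.Chars.isspace d) := by
  cases rest with
  | nil => simp [pvAWord, pvBHead]
  | cons d rest' =>
    by_cases hd : PySem.Chars.isspace d
    · simp [hd, pvAWord, pvBHead]
    · have hd' : PySem.Chars.isspace d = false := by simpa using hd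
      have ht : (d :: rest').takeWhile (fun x => !PySem.Chars.isspace x) =
          d :: rest'.takeWhile (fun x => !PySem.Chars.isspace x) := by
        simp [hd']
      rw [ht]
      by_cases hV : c = 'V'
      · subst hV
        by_cases hvow : PySem.Chars.lowerChar d ∈ (['a','e','i','o','u'] : List Char) <;>
          simp [pvAWord, pvBHead, pvIsIn_singleton, hd', hvow, pvLower_eq_v]
      · by_cases hv : c = 'v'
        · subst hv
          by_cases hvow : PySem.Chars.lowerChar d ∈ (['a','e','i','o','u'] : List Char) <;>
            simp [pvAWord, pvBHead, pvIsIn_singleton, hd', hvow, pvLower_eq_v]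
        · have hlow : ¬ PySem.Chars.lowerChar c = 'v' := by
            intro h
            rcases (pvLower_eq_v c).mp h with h' | h'
            · exact hv h'
            · exact hV h'
          simp [pvAWord, pvBHead, hlow, hv, hV]

theorem pvBGo_inWord : ∀ (cs : List Char) (st : Bool),
    pvBGo cs st true =
      cs.takeWhile (fun d => !PySem.Chars.isspace d) ++
        pvBGo (cs.dropWhile (fun d => !PySem.Chars.isspace d)) st false := by
  intro cs
  induction cs with
  | nil => intro st; simp [pvBGo]
  | cons c rest ih =>
    intro st
    by_cases hs : PySem.Chars.isspace c
    · simp [pvBGo, hs]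
    · simp [pvBGo, hs, ih st]

theorem pvMainAux : ∀ (n : Nat) (cs : List Char), cs.length ≤ n → ∀ (started : Bool),
    pvBGo cs started false =
      (if started = true ∧ PySem.Chars.split₀ cs ≠ [] then [' '] else []) ++
        PySem.Chars.join [' '] ((PySem.Chars.split₀ cs).map pvAWord) := by
  intro n
  induction n with
  | zero =>
    intro cs hlen started
    have hnil : cs = [] := List.eq_nil_of_length_eq_zero (Nat.le_zero.mp hlen)
    subst hnil
    simp [pvBGo, PySem.Chars.split₀, PySem.Chars.split₀.go, PySem.Chars.join, List.intercalate]
  | succ n ih =>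
    intro cs hlen started
    cases cs with
    | nil =>
      simp [pvBGo, PySem.Chars.split₀, PySem.Chars.split₀.go, PySem.Chars.join, List.intercalate]
    | cons c rest =>
      have hrest : rest.length ≤ n := by simp at hlen; omega
      by_cases hs : PySem.Chars.isspace c
      · rw [pvSplit_cons_space c rest hs]
        rw [show pvBGo (c :: rest) started false = pvBGo rest started false from by
          simp [pvBGo, hs]]
        exact ih rest hrest started
      · have hs' : PySem.Chars.isspace c = false := by simpa using hs
        rw [pvSplit_cons_word c rest hs']
        rw [show pvBGo (c :: rest) started false =
            (if started then [' '] else []) ++ pvBHead c rest :: pvBGo rest true true from by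
          simp [pvBGo, hs']]
        rw [pvBGo_inWord rest true]
        rw [ih (rest.dropWhile (fun d => !PySem.Chars.isspace d))
            (le_trans (List.length_dropWhile_le _ _) hrest) true]
        rw [List.map_cons, pvJoin_cons, pvAWord_head c rest]
        by_cases hend : PySem.Chars.split₀ (rest.dropWhile (fun d => !PySem.Chars.isspace d)) = []
        · simp only [hend, List.map_nil]
          cases started <;> simp
        · cases started <;> simp [hend]

-- ===== VERDICT (by name: the statement is the Claim_ definition above) =====
theorem normalize_u_v_spec : Claim_equal_normalize_u_v := by
  intro text _
  unfold Spec_normalize_u_v normalize_u_v normalize_u_v_alt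
  rw [pvFoldl_append_map, List.nil_append, pvMainAux text.toList.length text.toList le_rfl false]
  simp
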